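-- pv_equiv track=rewrite | github.com/sunil-srinivasa/cosmos-rl | cosmos_rl/tools/dataset/internvl_sft.py | _replace_assistant_content
-- ===== SOURCE A (Python) =====
-- from typing import List, Any, Dict, Optional
--
-- def _replace_assistant_content(
--
--     token_ids: List[int],
--     label_ids: List[int],
--     pad_token_id: int,
--     eos_token_id: int,
--     replacement_ids: List[int],
--     pad_run_length: int = 10,
-- ) -> List[int]:
--     """
--     Find the first run of exactly `pad_run_length` pad_token_id's in token_ids,
--     replace that run with replacement_ids, and return the new list.
--     If no such run is found, returns the original list unchanged.
--     """
--     n = len(token_ids)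
--     target_run = [pad_token_id] * pad_run_length
--
--     # find the start index of the first matching run
--     for i in range(n - pad_run_length + 1):
--         if token_ids[i : i + pad_run_length] == target_run:
--             # splice in the replacement
--             if (
--                 len(token_ids) > i + pad_run_length
--                 and token_ids[i + pad_run_length] == eos_token_id
--             ):
--                 label_ids = (
--                     label_ids[:i]
--                     + replacement_ids
--                     + [eos_token_id]
--                     + label_ids[i + pad_run_length + 1 :]
--                 )
--             else:
--                 label_ids = (
--                     label_ids[:i]
--                     + replacement_ids
--                     + label_ids[i + pad_run_length :]
--                 )
--             return (
--                 True,
--                 token_ids[:i] + replacement_ids + token_ids[i + pad_run_length :],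
--                 label_ids,
--             )
--     # no match found
--     return False, token_ids, label_ids
-- ===== SOURCE B (Python) =====
-- def _replace_assistant_content(
--     token_ids,
--     label_ids,
--     pad_token_id,
--     eos_token_id,
--     replacement_ids,
--     pad_run_length=10,
-- ):
--     # Single pass: count consecutive pad tokens; a run is complete when the
--     # counter reaches pad_run_length, and its start is pos + 1 - pad_run_length.
--     if pad_run_length <= 0:
--         return False, token_ids, label_ids
--     run = 0
--     for pos, tok in enumerate(token_ids):
--         run = run + 1 if tok == pad_token_id else 0
--         if run == pad_run_length:
--             i = pos + 1 - pad_run_length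
--             j = pos + 1
--             new_tokens = token_ids[:i] + replacement_ids + token_ids[j:]
--             if j < len(token_ids) and token_ids[j] == eos_token_id:
--                 new_labels = label_ids[:i] + replacement_ids + [eos_token_id] + label_ids[j + 1:]
--             else:
--                 new_labels = label_ids[:i] + replacement_ids + label_ids[j:]
--             return True, new_tokens, new_labels
--     return False, token_ids, label_ids
-- ===== Notes on version B (the rewrite author's own statement) =====
-- stated objective: faster
-- what changed: A slides a window over every index and rebuilds and compares a length-L slice at each position (O(n*L)); B makes one pass keeping a counter of consecutive pad tokens and splices at pos+1-L when the counter reaches L (O(n)).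
-- intended difference: For pad_run_length <= 0 A always 'matches' an empty pad run (returning True and splicing the replacement in via Python's negative-slice wraparound, e.g. inserting it before the last |L| elements), which is an artefact; B returns (False, token_ids, label_ids) since no positive-length pad run is requested. — e.g. on _replace_assistant_content([1], [2], 0, 9, [7], 0): A returns (true, [7, 1], [7, 2]), B returns (false, [1], [2])
import Mathlib
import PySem

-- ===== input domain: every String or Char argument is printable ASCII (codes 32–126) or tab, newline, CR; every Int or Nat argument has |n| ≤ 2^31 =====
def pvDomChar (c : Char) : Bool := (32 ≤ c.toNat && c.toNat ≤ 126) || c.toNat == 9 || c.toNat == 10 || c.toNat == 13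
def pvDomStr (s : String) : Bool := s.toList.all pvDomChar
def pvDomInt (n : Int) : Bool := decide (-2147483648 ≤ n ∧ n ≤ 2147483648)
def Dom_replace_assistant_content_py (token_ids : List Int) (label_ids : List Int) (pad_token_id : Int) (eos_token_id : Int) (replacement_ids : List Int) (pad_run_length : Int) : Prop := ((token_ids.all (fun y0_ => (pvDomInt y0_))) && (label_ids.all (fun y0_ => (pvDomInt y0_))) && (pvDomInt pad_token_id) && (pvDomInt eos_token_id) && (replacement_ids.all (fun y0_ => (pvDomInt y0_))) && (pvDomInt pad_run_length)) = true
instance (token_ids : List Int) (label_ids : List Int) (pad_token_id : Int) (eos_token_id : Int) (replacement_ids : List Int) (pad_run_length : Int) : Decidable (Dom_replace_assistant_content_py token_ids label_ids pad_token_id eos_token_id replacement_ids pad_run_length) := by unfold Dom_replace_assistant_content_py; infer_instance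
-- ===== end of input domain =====

-- B replaces A's slide-a-window-and-compare-a-slice scan (O(n*L)) by a single pass
-- that counts consecutive pad tokens and splices at pos+1-L when the counter reaches L (O(n)).
-- Python A mutates no argument; the equivalence is about the return value.

-- ===== PORT A =====
-- A's loop body at a matching index i (the splice A builds there, branch order as in Python).
-- `token_ids[i + pad_run_length]` is ported as pyGetD with default 0: the two differ only where
-- Python raises IndexError, and exactly those inputs are excluded by Pre_ below.
def pvSpliceA (tok lab rep : List Int) (eos L n i : Int) : Bool × List Int × List Int :=
  ( true,
    PySem.List.slice tok none (some i) ++ rep ++ PySem.List.slice tok (some (i + L)) none,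
    if n > i + L ∧ PySem.List.pyGetD tok (i + L) 0 = eos then
      PySem.List.slice lab none (some i) ++ rep ++ [eos] ++ PySem.List.slice lab (some (i + L + 1)) none
    else
      PySem.List.slice lab none (some i) ++ rep ++ PySem.List.slice lab (some (i + L)) none )

-- A's `for i in range(n - pad_run_length + 1)` loop with early return.
def pvLoopA (tok lab rep : List Int) (pad eos L n : Int) : List Int → Bool × List Int × List Int
  | [] => (false, tok, lab)
  | i :: rest =>
    if PySem.List.slice tok (some i) (some (i + L)) = List.replicate L.toNat pad then
      pvSpliceA tok lab rep eos L n i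
    else pvLoopA tok lab rep pad eos L n rest

def replace_assistant_content_py (token_ids : List Int) (label_ids : List Int) (pad_token_id : Int) (eos_token_id : Int) (replacement_ids : List Int) (pad_run_length : Int) : Bool × List Int × List Int :=
  let n : Int := token_ids.length
  pvLoopA token_ids label_ids replacement_ids pad_token_id eos_token_id pad_run_length n
    (PySem.List.pyRange 0 (n - pad_run_length + 1) 1)

-- ===== PORT B =====
-- B's single pass: `run` counts consecutive pads; on run == pad_run_length splice at i = pos+1-L.
def pvScanB (tok lab rep : List Int) (pad eos : Int) (Lnat : Nat) : List Int → Nat → Nat → Bool × List Int × List Int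
  | [], _, _ => (false, tok, lab)
  | t :: rest, pos, run =>
    let run' := if t = pad then run + 1 else 0
    if run' = Lnat then
      let i := pos + 1 - Lnat
      let j := pos + 1
      ( true,
        tok.take i ++ rep ++ tok.drop j,
        if j < tok.length ∧ tok.getD j 0 = eos then
          lab.take i ++ rep ++ [eos] ++ lab.drop (j + 1)
        else
          lab.take i ++ rep ++ lab.drop j )
    else pvScanB tok lab rep pad eos Lnat rest (pos + 1) run'

def replace_assistant_content_py_alt (token_ids : List Int) (label_ids : List Int) (pad_token_id : Int) (eos_token_id : Int) (replacement_ids : List Int) (pad_run_length : Int) : Bool × List Int × List Int :=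
  if pad_run_length ≤ 0 then (false, token_ids, label_ids)
  else pvScanB token_ids label_ids replacement_ids pad_token_id eos_token_id pad_run_length.toNat token_ids 0 0

-- ===== PRECONDITION & SPEC =====
-- Pre_ excludes exactly the inputs where A raises IndexError: pad_run_length < 0 with
-- len(token_ids) < -pad_run_length (token_ids[i + pad_run_length] reads past the front).
def Pre_replace_assistant_content_py (token_ids : List Int) (label_ids : List Int) (pad_token_id : Int) (eos_token_id : Int) (replacement_ids : List Int) (pad_run_length : Int) : Prop :=
  pad_run_length < 0 → -pad_run_length ≤ (token_ids.length : Int)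
instance (token_ids : List Int) (label_ids : List Int) (pad_token_id : Int) (eos_token_id : Int) (replacement_ids : List Int) (pad_run_length : Int) : Decidable (Pre_replace_assistant_content_py token_ids label_ids pad_token_id eos_token_id replacement_ids pad_run_length) := by unfold Pre_replace_assistant_content_py; infer_instance

def pvWitness_replace_assistant_content_py : List Int × List Int × Int × Int × List Int × Int :=
  ([1, 0, 0, 9], [5, 6, 7, 8], 0, 9, [3, 4], 2)


-- For pad_run_length ≤ 0, A always 'matches' an empty pad run and returns True with the
-- replacement spliced in via Python's negative-slice wraparound (an implementation artefact);
-- B returns (False, token_ids, label_ids), the intended value: no positive-length run is requested.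
def D_replace_assistant_content_py (token_ids : List Int) (label_ids : List Int) (pad_token_id : Int) (eos_token_id : Int) (replacement_ids : List Int) (pad_run_length : Int) : Prop :=
  pad_run_length ≤ 0
instance (token_ids : List Int) (label_ids : List Int) (pad_token_id : Int) (eos_token_id : Int) (replacement_ids : List Int) (pad_run_length : Int) : Decidable (D_replace_assistant_content_py token_ids label_ids pad_token_id eos_token_id replacement_ids pad_run_length) := by unfold D_replace_assistant_content_py; infer_instance

def Spec_replace_assistant_content_py (token_ids : List Int) (label_ids : List Int) (pad_token_id : Int) (eos_token_id : Int) (replacement_ids : List Int) (pad_run_length : Int) (out : Bool × List Int × List Int) : Prop := ¬ D_replace_assistant_content_py token_ids label_ids pad_token_id eos_token_id replacement_ids pad_run_length → out = replace_assistant_content_py_alt token_ids label_ids pad_token_id eos_token_id replacement_ids pad_run_length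
instance (token_ids : List Int) (label_ids : List Int) (pad_token_id : Int) (eos_token_id : Int) (replacement_ids : List Int) (pad_run_length : Int) (out : Bool × List Int × List Int) : Decidable (Spec_replace_assistant_content_py token_ids label_ids pad_token_id eos_token_id replacement_ids pad_run_length out) := by unfold Spec_replace_assistant_content_py; infer_instance

def pvDiffWitness_replace_assistant_content_py : List Int × List Int × Int × Int × List Int × Int :=
  ([1], [2], 0, 9, [7], 0)
def pvDiffWitnessOut_replace_assistant_content_py : (Bool × List Int × List Int) × (Bool × List Int × List Int) :=
  ((true, [7, 1], [7, 2]), (false, [1], [2]))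

-- ===== CLAIM (what is proved, stated in full; the proofs are below) =====
def Claim_unchanged_replace_assistant_content_py : Prop := ∀ (token_ids : List Int) (label_ids : List Int) (pad_token_id : Int) (eos_token_id : Int) (replacement_ids : List Int) (pad_run_length : Int), Dom_replace_assistant_content_py token_ids label_ids pad_token_id eos_token_id replacement_ids pad_run_length → Pre_replace_assistant_content_py token_ids label_ids pad_token_id eos_token_id replacement_ids pad_run_length → Spec_replace_assistant_content_py token_ids label_ids pad_token_id eos_token_id replacement_ids pad_run_length (replace_assistant_content_py token_ids label_ids pad_token_id eos_token_id replacement_ids pad_run_length)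
def Claim_changed_replace_assistant_content_py : Prop := Dom_replace_assistant_content_py (pvDiffWitness_replace_assistant_content_py.1) (pvDiffWitness_replace_assistant_content_py.2.1) (pvDiffWitness_replace_assistant_content_py.2.2.1) (pvDiffWitness_replace_assistant_content_py.2.2.2.1) (pvDiffWitness_replace_assistant_content_py.2.2.2.2.1) (pvDiffWitness_replace_assistant_content_py.2.2.2.2.2) ∧ Pre_replace_assistant_content_py (pvDiffWitness_replace_assistant_content_py.1) (pvDiffWitness_replace_assistant_content_py.2.1) (pvDiffWitness_replace_assistant_content_py.2.2.1) (pvDiffWitness_replace_assistant_content_py.2.2.2.1) (pvDiffWitness_replace_assistant_content_py.2.2.2.2.1) (pvDiffWitness_replace_assistant_content_py.2.2.2.2.2) ∧ D_replace_assistant_content_py (pvDiffWitness_replace_assistant_content_py.1) (pvDiffWitness_replace_assistant_content_py.2.1) (pvDiffWitness_replace_assistant_content_py.2.2.1) (pvDiffWitness_replace_assistant_content_py.2.2.2.1) (pvDiffWitness_replace_assistant_content_py.2.2.2.2.1) (pvDiffWitness_replace_assistant_content_py.2.2.2.2.2) ∧ replace_assistant_content_py (pvDiffWitness_replace_assistant_content_py.1)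 (pvDiffWitness_replace_assistant_content_py.2.1) (pvDiffWitness_replace_assistant_content_py.2.2.1) (pvDiffWitness_replace_assistant_content_py.2.2.2.1) (pvDiffWitness_replace_assistant_content_py.2.2.2.2.1) (pvDiffWitness_replace_assistant_content_py.2.2.2.2.2) = pvDiffWitnessOut_replace_assistant_content_py.1 ∧ replace_assistant_content_py_alt (pvDiffWitness_replace_assistant_content_py.1) (pvDiffWitness_replace_assistant_content_py.2.1) (pvDiffWitness_replace_assistant_content_py.2.2.1) (pvDiffWitness_replace_assistant_content_py.2.2.2.1) (pvDiffWitness_replace_assistant_content_py.2.2.2.2.1) (pvDiffWitness_replace_assistant_content_py.2.2.2.2.2) = pvDiffWitnessOut_replace_assistant_content_py.2 ∧ pvDiffWitnessOut_replace_assistant_content_py.1 ≠ pvDiffWitnessOut_replace_assistant_content_py.2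
def Claim_exact_replace_assistant_content_py : Prop := ∀ (token_ids : List Int) (label_ids : List Int) (pad_token_id : Int) (eos_token_id : Int) (replacement_ids : List Int) (pad_run_length : Int), Dom_replace_assistant_content_py token_ids label_ids pad_token_id eos_token_id replacement_ids pad_run_length → Pre_replace_assistant_content_py token_ids label_ids pad_token_id eos_token_id replacement_ids pad_run_length → D_replace_assistant_content_py token_ids label_ids pad_token_id eos_token_id replacement_ids pad_run_length → replace_assistant_content_py token_ids label_ids pad_token_id eos_token_id replacement_ids pad_run_length ≠ replace_assistant_content_py_alt token_ids label_ids pad_token_id eos_token_id replacement_ids pad_run_length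

-- ===== LEMMAS AND PROOFS =====

-- proof-side vocabulary: the window test at index j and the first matching window
def pvWin (tok : List Int) (pad : Int) (Lnat j : Nat) : Bool :=
  decide ((tok.drop j).take Lnat = List.replicate Lnat pad)

def pvFirst (tok : List Int) (pad : Int) (Lnat : Nat) : Option Nat :=
  (List.range (tok.length + 1 - Lnat)).find? (pvWin tok pad Lnat)

-- the common splice, in Nat coordinates
def pvSpliceN (tok lab rep : List Int) (eos : Int) (Lnat j : Nat) : Bool × List Int × List Int :=
  ( true,
    tok.take j ++ rep ++ tok.drop (j + Lnat),
    if j + Lnat < tok.length ∧ tok.getD (j + Lnat) 0 = eos then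
      lab.take j ++ rep ++ [eos] ++ lab.drop (j + Lnat + 1)
    else
      lab.take j ++ rep ++ lab.drop (j + Lnat) )

def pvResult (tok lab rep : List Int) (eos : Int) (Lnat : Nat) : Option Nat → Bool × List Int × List Int
  | none => (false, tok, lab)
  | some j => pvSpliceN tok lab rep eos Lnat j

lemma pvWin_iff (tok : List Int) (pad : Int) (Lnat j : Nat) (hpos : 0 < Lnat) :
    pvWin tok pad Lnat j = true ↔
      j + Lnat ≤ tok.length ∧ ∀ k < Lnat, tok.getD (j + k) 0 = pad := by
  unfold pvWin
  rw [decide_eq_true_iff, List.eq_replicate_iff]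
  constructor
  · rintro ⟨hlen, hall⟩
    simp [List.length_take, List.length_drop] at hlen
    have hle : j + Lnat ≤ tok.length := by omega
    refine ⟨hle, fun k hk => ?_⟩
    have hk2 : j + k < tok.length := by omega
    rw [List.getD_eq_getElem tok 0 hk2]
    have hkt : k < ((tok.drop j).take Lnat).length := by
      simp [List.length_take, List.length_drop]; omega
    have := hall ((tok.drop j).take Lnat)[k] (List.getElem_mem hkt)
    rw [List.getElem_take, List.getElem_drop] at this
    exact this
  · rintro ⟨hle, hall⟩
    have hlen : ((tok.drop j).take Lnat).length = Lnat := by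
      simp [List.length_take, List.length_drop]; omega
    refine ⟨hlen, fun b hb => ?_⟩
    obtain ⟨k, hk, rfl⟩ := List.mem_iff_getElem.mp hb
    rw [List.getElem_take, List.getElem_drop]
    have hk' : k < Lnat := by rw [hlen] at hk; exact hk
    have := hall k hk'
    rw [List.getD_eq_getElem tok 0 (by omega)] at this
    exact this


lemma loopA_eq_find (tok lab rep : List Int) (pad eos L n : Int) (is : List Int) :
    pvLoopA tok lab rep pad eos L n is =
      match is.find? (fun i => decide (PySem.List.slice tok (some i) (some (i + L)) = List.replicate L.toNat pad)) with
      | none => (false, tok, lab)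
      | some i => pvSpliceA tok lab rep eos L n i := by
  induction is with
  | nil => simp [pvLoopA, List.find?]
  | cons i rest ih =>
    rw [pvLoopA, List.find?]
    by_cases h : PySem.List.slice tok (some i) (some (i + L)) = List.replicate L.toNat pad
    · simp [h]
    · simp [h, ih]


lemma spliceA_eq (tok lab rep : List Int) (eos : Int) (Lnat k : Nat) :
    pvSpliceA tok lab rep eos (Lnat : Int) (tok.length : Int) (k : Int) = pvSpliceN tok lab rep eos Lnat k := by
  unfold pvSpliceA pvSpliceN
  have h1 : (k : Int) + (Lnat : Int) = ((k + Lnat : Nat) : Int) := by push_cast; ring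
  have h2 : ((k + Lnat : Nat) : Int) + 1 = ((k + Lnat + 1 : Nat) : Int) := by push_cast; ring
  rw [h1, h2]
  rw [PySem.List.slice_to_natCast, PySem.List.slice_from_natCast,
      PySem.List.slice_to_natCast, PySem.List.slice_from_natCast, PySem.List.slice_from_natCast,
      PySem.List.pyGetD_natCast]
  have h3 : ((tok.length : Int) > ((k + Lnat : Nat) : Int)) ↔ (k + Lnat < tok.length) := by
    constructor <;> intro h <;> exact_mod_cast h
  refine Prod.ext rfl (Prod.ext rfl ?_)
  simp only [h3]

lemma A_eq_result (tok lab rep : List Int) (pad eos L : Int) (hL : 1 ≤ L) :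
    replace_assistant_content_py tok lab pad eos rep L =
      pvResult tok lab rep eos L.toNat (pvFirst tok pad L.toNat) := by
  have hLcast : L = (L.toNat : Int) := by omega
  set Lnat := L.toNat with hLn
  unfold replace_assistant_content_py
  rw [loopA_eq_find]
  have hb : (((tok.length : Int) - L + 1) - 0).toNat = tok.length + 1 - Lnat := by omega
  rw [PySem.List.pyRange_one, hb, List.find?_map]
  have hpred : ((fun i => decide (PySem.List.slice tok (some i) (some (i + L)) = List.replicate Lnat pad)) ∘ (fun k : Nat => (0 : Int) + (k : Int))) = pvWin tok pad Lnat := by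
    funext k
    simp only [Function.comp, zero_add, pvWin]
    rw [hLcast, PySem.List.slice_natCast_add]
  rw [hpred]
  unfold pvFirst
  cases hf : (List.range (tok.length + 1 - Lnat)).find? (pvWin tok pad Lnat) with
  | none => simp [pvResult]
  | some k =>
    simp only [Option.map_some]
    rw [zero_add]
    show pvSpliceA tok lab rep eos L (tok.length : Int) (k : Int) = pvResult tok lab rep eos Lnat (some k)
    rw [hLcast]
    exact spliceA_eq tok lab rep eos Lnat k


lemma scanB_eq (tok lab rep : List Int) (pad eos : Int) (Lnat : Nat) (hL : 0 < Lnat) :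
    ∀ (rest : List Int) (pos run : Nat),
      rest = tok.drop pos → pos ≤ tok.length → run ≤ pos → run < Lnat →
      (∀ k, pos - run ≤ k → k < pos → tok.getD k 0 = pad) →
      (∀ i, i < pos - run → pvWin tok pad Lnat i = false) →
      pvScanB tok lab rep pad eos Lnat rest pos run =
        pvResult tok lab rep eos Lnat (pvFirst tok pad Lnat) := by
  intro rest
  induction rest with
  | nil =>
    intro pos run hdrop hpos hrun hrunL h2 h3
    have hlen : tok.length ≤ pos := List.drop_eq_nil_iff.mp hdrop.symm
    have hfind : pvFirst tok pad Lnat = none := by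
      unfold pvFirst
      rw [List.find?_range_eq_none]
      intro i hi
      simp only [Bool.not_eq_eq_eq_not, Bool.not_true]
      by_cases hcase : i < pos - run
      · exact h3 i hcase
      · -- pos - run ≤ i: a window there would end past pos = length
        rw [Bool.eq_false_iff]
        intro hwin
        have := (pvWin_iff tok pad Lnat i hL).mp hwin
        omega
    rw [hfind, pvScanB, pvResult]
  | cons t rest' ih =>
    intro pos run hdrop hpos hrun hrunL h2 h3
    have hposlt : pos < tok.length := by
      by_contra h
      rw [List.drop_eq_nil_iff.mpr (by omega)] at hdrop
      exact List.cons_ne_nil t rest' hdrop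
    have htpos : tok.getD pos 0 = t := by
      have h1 : tok[pos]? = some t := by
        rw [← List.head?_drop, ← hdrop]; rfl
      rw [List.getD_eq_getElem tok 0 hposlt]
      exact Option.some.inj (by rw [← List.getElem?_eq_getElem hposlt, h1])
    have hdrop' : rest' = tok.drop (pos + 1) := by
      have := congrArg List.tail hdrop
      simpa [List.tail_drop] using this
    rw [pvScanB]
    by_cases hpad : t = pad
    · rw [if_pos hpad]
      by_cases hhit : run + 1 = Lnat
      · rw [if_pos hhit]
        -- found: first window is j := pos - run
        have hj : pvFirst tok pad Lnat = some (pos - run) := by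
          unfold pvFirst
          rw [List.find?_range_eq_some]
          refine ⟨?_, ?_, ?_⟩
          · rw [pvWin_iff tok pad Lnat _ hL]
            constructor
            · omega
            · intro k hk
              by_cases hk2 : pos - run + k < pos
              · exact h2 _ (by omega) hk2
              · have : pos - run + k = pos := by omega
                rw [this, htpos, hpad]
          · rw [List.mem_range]; omega
          · intro i hi
            simp only [Bool.not_eq_eq_eq_not, Bool.not_true]
            exact h3 i (by omega)
        rw [hj, pvResult, pvSpliceN]
        have e1 : pos + 1 - Lnat = pos - run := by omega
        have e2 : pos - run + Lnat = pos + 1 := by omega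
        rw [e1, e2]
      · rw [if_neg hhit]
        refine ih (pos + 1) (run + 1) hdrop' (by omega) (by omega) (by omega) ?_ ?_
        · intro k hk1 hk2
          by_cases hk3 : k < pos
          · exact h2 k (by omega) hk3
          · have : k = pos := by omega
            rw [this, htpos, hpad]
        · intro i hi
          exact h3 i (by omega)
    · simp only [if_neg hpad]
      have hz : ¬ (0 = Lnat) := by omega
      rw [if_neg hz]
      refine ih (pos + 1) 0 hdrop' (by omega) (by omega) hL (by omega) ?_
      · intro i hi
        by_cases hcase : i < pos - run
        · exact h3 i hcase
        · -- pos - run ≤ i ≤ pos: the window would contain tok[pos] = t ≠ pad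
          rw [Bool.eq_false_iff]
          intro hwin
          obtain ⟨hle, hall⟩ := (pvWin_iff tok pad Lnat i hL).mp hwin
          have hk : pos - i < Lnat := by omega
          have := hall (pos - i) hk
          rw [show i + (pos - i) = pos by omega, htpos] at this
          exact hpad this


lemma B_eq_result (tok lab rep : List Int) (pad eos L : Int) (hL : 1 ≤ L) :
    replace_assistant_content_py_alt tok lab pad eos rep L =
      pvResult tok lab rep eos L.toNat (pvFirst tok pad L.toNat) := by
  unfold replace_assistant_content_py_alt
  rw [if_neg (by omega)]
  exact scanB_eq tok lab rep pad eos L.toNat (by omega) tok 0 0 (by simp) (by omega) (by omega)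
    (by omega) (by omega) (by omega)


-- ===== VERDICT (by name: the statement is the Claim_ definition above) =====
theorem replace_assistant_content_py_spec : Claim_unchanged_replace_assistant_content_py := by
  intro tok lab pad eos rep L _ _ hD
  have hL : 1 ≤ L := by
    unfold D_replace_assistant_content_py at hD; omega
  rw [A_eq_result tok lab rep pad eos L hL, B_eq_result tok lab rep pad eos L hL]

theorem replace_assistant_content_py_changed : Claim_changed_replace_assistant_content_py := by
  unfold Claim_changed_replace_assistant_content_py; decide

theorem replace_assistant_content_py_tight : Claim_exact_replace_assistant_content_py := by
  intro tok lab pad eos rep L _ _ hD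
  unfold D_replace_assistant_content_py at hD
  unfold replace_assistant_content_py replace_assistant_content_py_alt
  rw [if_pos hD, loopA_eq_find]
  cases hf : (PySem.List.pyRange 0 ((tok.length : Int) - L + 1) 1).find?
      (fun i => decide (PySem.List.slice tok (some i) (some (i + L)) = List.replicate L.toNat pad)) with
  | none =>
    exfalso
    rw [List.find?_eq_none] at hf
    have hmem : ((tok.length : Int) - L) ∈ PySem.List.pyRange 0 ((tok.length : Int) - L + 1) 1 := by
      rw [PySem.List.mem_pyRange_one]; omega
    have hp := hf _ hmem
    rw [decide_eq_true_iff] at hp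
    apply hp
    have hLz : L.toNat = 0 := by omega
    rw [hLz, List.replicate_zero, show (tok.length : Int) - L + L = (tok.length : Int) by ring]
    rw [PySem.List.slice_toNat tok (by omega) (by omega)]
    rw [List.drop_eq_nil_iff.mpr (by omega)]
    exact List.take_nil
  | some i =>
    intro h
    have := congrArg Prod.fst h
    simp [pvSpliceA] at this
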